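-- pv_equiv track=rewrite | github.com/AIALRA-0/AGENTSMD | AGENTSMD_CN/scripts/md_index_sync.py | section_map
-- ===== SOURCE A (Python) =====
-- def section_map(text: str):
--     lines = text.splitlines()
--     idx = []
--     for i, ln in enumerate(lines):
--         if ln.startswith("## "):
--             idx.append((ln[3:].strip(), i))
--     out = {}
--     for p, (name, start) in enumerate(idx):
--         end = idx[p + 1][1] if p + 1 < len(idx) else len(lines)
--         out[name] = lines[start + 1 : end]
--     return out
-- ===== SOURCE B (Python) =====
-- def section_map(text: str):
--     out = {}
--     current = None
--     for ln in text.splitlines():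
--         if ln.startswith("## "):
--             current = []
--             out[ln[3:].strip()] = current
--         elif current is not None:
--             current.append(ln)
--     return out
-- ===== Notes on version B (the rewrite author's own statement) =====
-- stated objective: simpler
-- what changed: Replaced A's two-pass collect-header-indices-then-slice construction with a single streaming pass that opens a fresh accumulator list at each section header and appends the following lines to it.
import Mathlib
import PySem

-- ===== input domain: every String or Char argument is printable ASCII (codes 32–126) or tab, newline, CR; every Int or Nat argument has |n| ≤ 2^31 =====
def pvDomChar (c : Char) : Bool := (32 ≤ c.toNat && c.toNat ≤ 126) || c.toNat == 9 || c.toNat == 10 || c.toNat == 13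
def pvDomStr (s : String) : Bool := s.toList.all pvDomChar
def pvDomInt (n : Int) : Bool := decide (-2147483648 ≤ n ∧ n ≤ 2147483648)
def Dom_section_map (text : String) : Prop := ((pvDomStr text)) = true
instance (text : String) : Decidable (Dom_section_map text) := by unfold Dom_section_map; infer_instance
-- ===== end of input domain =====

-- B does one streaming pass (a fresh accumulator per section header) instead of A's
-- collect-header-indices-then-slice two passes; return values proved equal on all inputs.

-- ===== PORT A =====
-- ln.startswith("## ")
def secHdr (ln : String) : Bool := PySem.Str.startswith ln "## "
-- ln[3:].strip()
def secName (ln : String) : String := PySem.Str.strip (PySem.Str.slice ln (some 3) none)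

-- A's first loop: idx = [(name, i) for header lines]
def sectionIdx (lines : List String) : List (String × Int) :=
  (PySem.List.enumerate lines).foldl
    (fun acc pi => if secHdr pi.2 then acc ++ [(secName pi.2, pi.1)] else acc) []

-- body of A's second loop (idx[p+1][1] is guarded by p+1 < len(idx), so pyGetD is exact)
def sectionBody (lines : List String) (idx : List (String × Int))
    (out : PySem.Dict String (List String)) (pe : Int × (String × Int)) :
    PySem.Dict String (List String) :=
  let endd : Int :=
    if pe.1 + 1 < (idx.length : Int) then (PySem.List.pyGetD idx (pe.1 + 1) ("", 0)).2
    else (lines.length : Int)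
  out.insert pe.2.1 (PySem.List.slice lines (some (pe.2.2 + 1)) (some endd))

def sectionDict (lines : List String) : PySem.Dict String (List String) :=
  (PySem.List.enumerate (sectionIdx lines)).foldl
    (sectionBody lines (sectionIdx lines)) PySem.Dict.empty

def section_map (text : String) : List (String × List String) :=
  (sectionDict (PySem.Str.splitlines text)).items

-- ===== PORT B =====
-- one step of B's loop; the Python mutable `current` list is the dict entry of the
-- most recent header's name, so `current.append(ln)` is a modify at that key
def sectionStep (st : PySem.Dict String (List String) × Option String) (ln : String) :
    PySem.Dict String (List String) × Option String :=
  if secHdr ln then (st.1.insert (secName ln) [], some (secName ln))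
  else
    match st.2 with
    | some k => (st.1.modify k [] (· ++ [ln]), st.2)
    | none => st

def section_map_alt (text : String) : List (String × List String) :=
  (((PySem.Str.splitlines text).foldl sectionStep (PySem.Dict.empty, none)).1).items

-- ===== PRECONDITION & SPEC =====
def Spec_section_map (text : String) (out : List (String × List String)) : Prop := out = section_map_alt text
instance (text : String) (out : List (String × List String)) : Decidable (Spec_section_map text out) := by unfold Spec_section_map; infer_instance

-- ===== CLAIM (what is proved, stated in full; the proofs are below) =====
def Claim_equal_section_map : Prop := ∀ (text : String), Dom_section_map text → Spec_section_map text (section_map text)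

-- ===== LEMMAS AND PROOFS =====

theorem insert_modify {κ ν : Type} [BEq κ] [LawfulBEq κ]
    (d : PySem.Dict κ ν) (k : κ) (v d0 : ν) (f : ν → ν) :
    (d.insert k v).modify k d0 f = d.insert k (f v) := by
  simp [PySem.Dict.modify, PySem.Dict.getD_insert_self, PySem.Dict.insert_insert_self]

theorem slice_append_of_le {α : Type} (L : List α) (x : α) (a b : Nat)
    (ha : a ≤ L.length) (hb : b ≤ L.length) :
    PySem.List.slice (L ++ [x]) (some (a : Int)) (some (b : Int)) =
      PySem.List.slice L (some (a : Int)) (some (b : Int)) := by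
  rw [PySem.List.slice_natCast, PySem.List.slice_natCast,
    List.drop_append_of_le_length ha,
    List.take_append_of_le_length (by simp only [List.length_drop]; omega)]

theorem slice_snoc {α : Type} (L : List α) (x : α) (a : Nat) (ha : a ≤ L.length) :
    PySem.List.slice (L ++ [x]) (some (a : Int)) (some ((L.length : Int) + 1)) =
      PySem.List.slice L (some (a : Int)) (some (L.length : Int)) ++ [x] := by
  have h1 : ((L.length : Int) + 1) = ((L.length + 1 : Nat) : Int) := by push_cast; ring
  rw [h1, PySem.List.slice_natCast, PySem.List.slice_natCast,
    List.drop_append_of_le_length ha]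
  rw [List.take_of_length_le (by simp only [List.length_append, List.length_drop, List.length_cons, List.length_nil]; omega),
    List.take_of_length_le (by simp only [List.length_drop]; omega)]

theorem sectionIdx_snoc (L : List String) (x : String) :
    sectionIdx (L ++ [x]) =
      sectionIdx L ++ (if secHdr x then [(secName x, (L.length : Int))] else []) := by
  unfold sectionIdx
  rw [PySem.List.enumerate_append, List.foldl_append]
  simp [PySem.List.enumerate_cons, PySem.List.enumerate_nil]
  split <;> simp

theorem sectionIdx_bound (L : List String) :
    ∀ e ∈ sectionIdx L, ∃ m : Nat, e.2 = (m : Int) ∧ m < L.length := by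
  induction L using List.reverseRecOn with
  | nil => simp [sectionIdx, PySem.List.enumerate_nil]
  | append_singleton L x ih =>
    intro e he
    rw [sectionIdx_snoc] at he
    rcases List.mem_append.1 he with h | h
    · obtain ⟨m, hm, hlt⟩ := ih e h
      exact ⟨m, hm, by simp; omega⟩
    · by_cases hx : secHdr x
      · simp [hx] at h
        exact ⟨L.length, by simp [h], by simp⟩
      · simp [hx] at h

-- A's loop body is unchanged by appending one line, for entries whose `end` stays within L
theorem sectionBody_stable (L : List String) (x : String) (idx idx' : List (String × Int))
    (hpre : ∀ j : Nat, j < idx.length → idx'.getD j ("", 0) = idx.getD j ("", 0))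
    (hlen : idx'.length = idx.length ∨ idx'.length = idx.length + 1)
    (hlast : idx'.length = idx.length + 1 → (idx'.getD idx.length ("", 0)).2 = (L.length : Int))
    (hstart : ∀ e ∈ idx, ∃ m : Nat, e.2 = (m : Int) ∧ m < L.length)
    (out : PySem.Dict String (List String)) (pe : Int × (String × Int))
    (hpe : pe ∈ PySem.List.enumerate idx 0)
    (hguard : idx'.length = idx.length → pe.1 + 1 < (idx.length : Int)) :
    sectionBody (L ++ [x]) idx' out pe = sectionBody L idx out pe := by
  obtain ⟨j, hj, rfl⟩ := (PySem.List.mem_enumerate_iff idx 0 pe).1 hpe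
  simp only [zero_add] at hguard ⊢
  obtain ⟨ms, hms, hmslt⟩ := hstart idx[j] (List.getElem_mem hj)
  unfold sectionBody
  simp only
  have hj1 : ((j : Int) + 1) = ((j + 1 : Nat) : Int) := by push_cast; ring
  by_cases hcase : j + 1 < idx.length
  · have hg : ((j : Int)) + 1 < (idx.length : Int) := by omega
    have hg' : ((j : Int)) + 1 < (idx'.length : Int) := by
      rcases hlen with h | h <;> rw [h] <;> omega
    rw [if_pos hg, if_pos hg', hj1, PySem.List.pyGetD_natCast, PySem.List.pyGetD_natCast,
      hpre (j + 1) hcase]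
    obtain ⟨m, hm, hmlt⟩ := hstart (idx.getD (j + 1) ("", 0))
      (by rw [List.getD_eq_getElem _ _ hcase]; exact List.getElem_mem hcase)
    rw [hm, hms]
    have h2 : ((ms : Int) + 1) = ((ms + 1 : Nat) : Int) := by push_cast; ring
    rw [h2, slice_append_of_le L x (ms + 1) m (by omega) (by omega)]
  · have hjeq : j + 1 = idx.length := by omega
    have hgf : ¬ ((j : Int) + 1 < (idx.length : Int)) := by omega
    rw [if_neg hgf]
    rcases hlen with h | h
    · exact absurd (by simpa using hguard h) hgf
    · have hg' : ((j : Int) + 1 < (idx'.length : Int)) := by rw [h]; push_cast; omega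
      rw [if_pos hg', hj1, PySem.List.pyGetD_natCast, hjeq, hlast h, hms]
      have h2 : ((ms : Int) + 1) = ((ms + 1 : Nat) : Int) := by push_cast; ring
      rw [h2, slice_append_of_le L x (ms + 1) L.length (by omega) (by omega)]

-- folding A's body over an index list with one more entry at the end
theorem foldl_enumerate_snoc {α β : Type} (f : β → Int × α → β) (J : List α) (e : α) (init : β) :
    (PySem.List.enumerate (J ++ [e]) 0).foldl f init =
      f ((PySem.List.enumerate J 0).foldl f init) ((J.length : Int), e) := by
  rw [PySem.List.enumerate_append, List.foldl_append,
    PySem.List.enumerate_cons, PySem.List.enumerate_nil]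
  simp

theorem main_invariant (L : List String) :
    sectionDict L = (L.foldl sectionStep (PySem.Dict.empty, none)).1 ∧
    (L.foldl sectionStep (PySem.Dict.empty, none)).2 = (sectionIdx L).getLast?.map (·.1) := by
  induction L using List.reverseRecOn with
  | nil =>
    constructor
    · simp [sectionDict, sectionIdx, PySem.List.enumerate_nil]
    · simp [sectionIdx, PySem.List.enumerate_nil]
  | append_singleton L x ih =>
    obtain ⟨ih1, ih2⟩ := ih
    have hbound := sectionIdx_bound L
    rw [List.foldl_append, List.foldl_cons, List.foldl_nil]
    by_cases hx : secHdr x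
    · -- header line: A inserts the new name with an empty slice, B does the same
      have hidx : sectionIdx (L ++ [x]) = sectionIdx L ++ [(secName x, (L.length : Int))] := by
        rw [sectionIdx_snoc, if_pos hx]
      have hA : sectionDict (L ++ [x]) = (sectionDict L).insert (secName x) [] := by
        unfold sectionDict
        rw [hidx, foldl_enumerate_snoc]
        have hcongr : List.foldl (sectionBody (L ++ [x]) (sectionIdx L ++ [(secName x, (L.length : Int))]))
              PySem.Dict.empty (PySem.List.enumerate (sectionIdx L) 0) =
            List.foldl (sectionBody L (sectionIdx L)) PySem.Dict.empty
              (PySem.List.enumerate (sectionIdx L) 0) := by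
          apply PySem.List.foldl_congr_mem
          intro acc pe hpe
          exact sectionBody_stable L x (sectionIdx L) _
            (fun j hj => List.getD_append _ _ _ j hj)
            (Or.inr (by simp))
            (fun _ => by rw [List.getD_append_right _ _ _ _ (le_refl _)]; simp)
            hbound acc pe hpe
            (fun h => absurd h (by simp))
        rw [hcongr]
        unfold sectionBody
        have hg : ¬ (((sectionIdx L).length : Int) + 1 <
            ((sectionIdx L ++ [(secName x, (L.length : Int))]).length : Int)) := by
          simp only [List.length_append, List.length_cons, List.length_nil]; push_cast; omega
        simp only
        rw [if_neg hg]
        have h1 : ((L.length : Int) + 1) = ((L.length + 1 : Nat) : Int) := by push_cast; ring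
        have h2 : ((L ++ [x]).length : Int) = ((L.length + 1 : Nat) : Int) := by simp
        rw [h2, h1, PySem.List.slice_natCast]
        simp
      constructor
      · rw [hA, ih1]; simp [sectionStep, hx]
      · simp [sectionStep, hx, hidx]
    · -- ordinary line
      have hidx : sectionIdx (L ++ [x]) = sectionIdx L := by
        rw [sectionIdx_snoc, if_neg hx]; simp
      by_cases hemp : sectionIdx L = []
      · -- no header yet: A's dict is empty and stays empty, B's current is None
        have hcur : (L.foldl sectionStep (PySem.Dict.empty, none)).2 = none := by
          rw [ih2, hemp]; rfl
        have hDL : sectionDict L = PySem.Dict.empty := by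
          unfold sectionDict; rw [hemp]; simp [PySem.List.enumerate_nil]
        have hDL' : sectionDict (L ++ [x]) = PySem.Dict.empty := by
          unfold sectionDict; rw [hidx, hemp]; simp [PySem.List.enumerate_nil]
        constructor
        · rw [hDL']; simp [sectionStep, hx, hcur, ← ih1, hDL]
        · simp [sectionStep, hx, hcur, hidx, hemp]
      · -- at least one header: A extends the last slice by [x]; B appends to its current list
        have hd : sectionIdx L = (sectionIdx L).dropLast ++ [(sectionIdx L).getLast hemp] :=
          (List.dropLast_append_getLast hemp).symm
        have hlenJ : (sectionIdx L).length = (sectionIdx L).dropLast.length + 1 := by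
          conv_lhs => rw [hd]
          simp
        obtain ⟨ms, hms, hmslt⟩ := hbound ((sectionIdx L).getLast hemp) (List.getLast_mem hemp)
        have hcur : (L.foldl sectionStep (PySem.Dict.empty, none)).2 =
            some ((sectionIdx L).getLast hemp).1 := by
          rw [ih2, List.getLast?_eq_some_getLast hemp]; rfl
        -- decompose both folds at the last index entry
        have hprefix : List.foldl (sectionBody (L ++ [x]) (sectionIdx L)) PySem.Dict.empty
              (PySem.List.enumerate ((sectionIdx L).dropLast) 0) =
            List.foldl (sectionBody L (sectionIdx L)) PySem.Dict.empty
              (PySem.List.enumerate ((sectionIdx L).dropLast) 0) := by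
          apply PySem.List.foldl_congr_mem
          intro acc pe hpe
          obtain ⟨jj, hjj, rfl⟩ := (PySem.List.mem_enumerate_iff _ 0 pe).1 hpe
          have hpe' : ((0 : Int) + jj, (sectionIdx L).dropLast[jj]) ∈
              PySem.List.enumerate (sectionIdx L) 0 := by
            conv in PySem.List.enumerate (sectionIdx L) 0 => rw [hd]
            rw [PySem.List.enumerate_append]
            exact List.mem_append_left _ hpe
          have hgd : (sectionIdx L).dropLast[jj] = (sectionIdx L)[jj]'(by omega) := by
            rw [List.getElem_dropLast]
          apply sectionBody_stable L x (sectionIdx L) (sectionIdx L) (fun _ _ => rfl)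
            (Or.inl rfl) (by omega) hbound _ _ hpe'
          intro _
          simp only [zero_add]
          omega
        have hA : sectionDict (L ++ [x]) =
            (sectionDict L).modify ((sectionIdx L).getLast hemp).1 [] (· ++ [x]) := by
          have hvA : sectionDict L =
              (List.foldl (sectionBody L (sectionIdx L)) PySem.Dict.empty
                (PySem.List.enumerate ((sectionIdx L).dropLast) 0)).insert
                ((sectionIdx L).getLast hemp).1
                (PySem.List.slice L (some (((sectionIdx L).getLast hemp).2 + 1))
                  (some (L.length : Int))) := by
            unfold sectionDict
            conv_lhs => rw [hd]
            rw [foldl_enumerate_snoc]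
            have hcongr2 : List.foldl (sectionBody L (sectionIdx L)) PySem.Dict.empty
                  (PySem.List.enumerate ((sectionIdx L).dropLast) 0) =
                List.foldl (sectionBody L ((sectionIdx L).dropLast ++ [(sectionIdx L).getLast hemp]))
                  PySem.Dict.empty (PySem.List.enumerate ((sectionIdx L).dropLast) 0) := by
              rw [← hd]
            rw [← hcongr2, ← hd]
            unfold sectionBody
            simp only
            have hg : ¬ ((((sectionIdx L).dropLast.length : Int)) + 1 < ((sectionIdx L).length : Int)) := by
              omega
            rw [if_neg hg]
          have hvA' : sectionDict (L ++ [x]) =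
              (List.foldl (sectionBody (L ++ [x]) (sectionIdx L)) PySem.Dict.empty
                (PySem.List.enumerate ((sectionIdx L).dropLast) 0)).insert
                ((sectionIdx L).getLast hemp).1
                (PySem.List.slice (L ++ [x]) (some (((sectionIdx L).getLast hemp).2 + 1))
                  (some ((L ++ [x]).length : Int))) := by
            unfold sectionDict
            rw [hidx]
            conv_lhs => rw [hd]
            rw [foldl_enumerate_snoc]
            have hcongr2 : List.foldl (sectionBody (L ++ [x]) (sectionIdx L)) PySem.Dict.empty
                  (PySem.List.enumerate ((sectionIdx L).dropLast) 0) =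
                List.foldl (sectionBody (L ++ [x]) ((sectionIdx L).dropLast ++ [(sectionIdx L).getLast hemp]))
                  PySem.Dict.empty (PySem.List.enumerate ((sectionIdx L).dropLast) 0) := by
              rw [← hd]
            rw [← hcongr2, ← hd]
            unfold sectionBody
            simp only
            have hg : ¬ ((((sectionIdx L).dropLast.length : Int)) + 1 < ((sectionIdx L).length : Int)) := by
              omega
            rw [if_neg hg]
          rw [hvA', hprefix, hvA]
          rw [insert_modify]
          congr 1
      -- the extended slice equals the old slice with [x] appended
          rw [hms]
          have hlen' : ((L ++ [x]).length : Int) = (L.length : Int) + 1 := by simp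
          have h2 : ((ms : Int) + 1) = ((ms + 1 : Nat) : Int) := by push_cast; ring
          rw [hlen', h2, slice_snoc L x (ms + 1) (by omega)]
        constructor
        · rw [hA, ih1]
          simp [sectionStep, hx, hcur]
        · simp [sectionStep, hx, hcur, hidx, List.getLast?_eq_some_getLast hemp]

-- ===== VERDICT (by name: the statement is the Claim_ definition above) =====
theorem section_map_spec : Claim_equal_section_map := by
  unfold Claim_equal_section_map
  intro text _
  unfold Spec_section_map section_map section_map_alt
  rw [(main_invariant (PySem.Str.splitlines text)).1]
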